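-- pv_equiv track=rewrite | github.com/JakubFr4czek/WDI | Zestaw3/5.py | search_min
-- ===== SOURCE A (Python) =====
-- def search_min(S):
--
--     mini = S[0]
--     pos = 0
--
--     for i in range(1,len(S)):
--
--         if S[i]>mini:
--             mini = S[i]
--             pos = i
--
--     return (mini, pos)
-- ===== SOURCE B (Python) =====
-- def search_min(S):
--     m = max(S)
--     return (m, S.index(m))
-- ===== Notes on version B (the rewrite author's own statement) =====
-- stated objective: idiomatic
-- what changed: Replaces A's fused index loop tracking a running extremum and its position with two library passes: m = max(S), then S.index(m) for its first position.
-- outside the precondition, e.g. on search_min([]): A raises IndexError, B raises ValueError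
import Mathlib
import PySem

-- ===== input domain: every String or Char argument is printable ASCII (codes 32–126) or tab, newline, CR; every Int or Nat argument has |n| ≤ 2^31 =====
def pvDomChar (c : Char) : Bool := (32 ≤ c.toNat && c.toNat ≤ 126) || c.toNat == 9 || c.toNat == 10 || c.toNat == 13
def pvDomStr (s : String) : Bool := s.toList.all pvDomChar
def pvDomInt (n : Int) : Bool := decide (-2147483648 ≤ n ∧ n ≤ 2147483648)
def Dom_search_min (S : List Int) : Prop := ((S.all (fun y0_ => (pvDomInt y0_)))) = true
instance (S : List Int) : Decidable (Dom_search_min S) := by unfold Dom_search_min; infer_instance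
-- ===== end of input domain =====

-- B replaces A's fused running-extremum-and-position loop with two library passes:
-- max(S) then S.index(m) (idiomatic; same cost).


-- ===== PORT A =====
-- transliteration: mini = S[0]; pos = 0; for i in range(1, len(S)): if S[i] > mini: mini, pos = S[i], i
-- (S[0] raising = the 'none' branch, excluded by Pre_; inside the loop every index is in
-- range, so pyGetD with default 0 is exact there)
def search_min (S : List Int) : Int × Int :=
  match PySem.List.pyGet? S 0 with
  | none => (0, 0)
  | some mini =>
    (PySem.List.pyRange 1 (PySem.List.len S) 1).foldl
      (fun st i => if PySem.List.pyGetD S i 0 > st.1 then (PySem.List.pyGetD S i 0, i) else st)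
      (mini, 0)

-- ===== PORT B =====
-- transliteration of Source B: m = max(S); return (m, S.index(m))  (max/index raising = the
-- 'none' branches, excluded by Pre_; for m = max(S), S.index(m) never raises)
def search_min_alt (S : List Int) : Int × Int :=
  match PySem.List.max? S (fun x => x) with
  | none => (0, 0)
  | some m => (m, ((PySem.List.index? S m).getD 0 : Nat))

-- ===== PRECONDITION & SPEC =====
-- A raises IndexError on the empty list (S[0]); B raises ValueError there (max([])).
def Pre_search_min (S : List Int) : Prop := S ≠ []
instance (S : List Int) : Decidable (Pre_search_min S) := by unfold Pre_search_min; infer_instance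
def pvWitness_search_min : List Int := ([3, 1, 3])

def Spec_search_min (S : List Int) (out : Int × Int) : Prop := out = search_min_alt S
instance (S : List Int) (out : Int × Int) : Decidable (Spec_search_min S out) := by unfold Spec_search_min; infer_instance

-- ===== CLAIM (what is proved, stated in full; the proofs are below) =====
def Claim_equal_search_min : Prop := ∀ (S : List Int), Dom_search_min S → Pre_search_min S → Spec_search_min S (search_min S)

-- ===== LEMMAS AND PROOFS =====

-- Invariant for A's loop: starting from a state (m, p) that is correct for the prefix
-- 'pre' of L (m ∈ pre, m an upper bound of pre, p its first index), the fold over the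
-- remaining indices yields a state correct for all of L.
lemma searchA_loop_inv (t : List Int) : ∀ (pre L : List Int) (m : Int) (p : Nat),
    L = pre ++ t → m ∈ pre → (∀ y ∈ pre, y ≤ m) → PySem.List.index? pre m = some p →
    let r := (PySem.List.pyRange (pre.length : Int) (L.length : Int) 1).foldl
      (fun st i => if PySem.List.pyGetD L i 0 > st.1 then (PySem.List.pyGetD L i 0, i) else st)
      (m, (p : Int))
    r.1 ∈ L ∧ (∀ y ∈ L, y ≤ r.1) ∧ PySem.List.index? L r.1 = some r.2.toNat ∧ 0 ≤ r.2 := by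
  induction t with
  | nil =>
    intro pre L m p hL hmem hub hidx
    subst hL
    simp only [List.append_nil]
    rw [PySem.List.pyRange_one_eq_nil (by omega), List.foldl_nil]
    exact ⟨hmem, hub, by rwa [Int.toNat_natCast], Int.natCast_nonneg p⟩
  | cons x t ih =>
    intro pre L m p hL hmem hub hidx
    have hlen : (pre.length : Int) < (L.length : Int) := by
      subst hL; simp only [List.length_append, List.length_cons]; push_cast; omega
    rw [PySem.List.pyRange_one_cons hlen, List.foldl_cons]
    have hget : PySem.List.pyGetD L (pre.length : Int) 0 = x := by
      subst hL
      rw [PySem.List.pyGetD_natCast]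
      simp [List.getD_eq_getElem?_getD]
    rw [hget]
    have h1 : L = (pre ++ [x]) ++ t := by simp [hL]
    have hcast : ((pre ++ [x]).length : Int) = (pre.length : Int) + 1 := by simp
    by_cases hgt : x > m
    · rw [if_pos hgt]
      have hx : x ∉ pre := fun hx => absurd (hub x hx) (by omega)
      have hub' : ∀ y ∈ pre ++ [x], y ≤ x := by
        intro y hy
        rcases List.mem_append.1 hy with h | h
        · exact le_of_lt (lt_of_le_of_lt (hub y h) hgt)
        · simp_all
      have := ih (pre ++ [x]) L x pre.length h1 (by simp) hub'
        (PySem.List.index?_append_singleton_self pre x hx)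
      rw [hcast] at this
      simpa using this
    · rw [if_neg hgt]
      have hub' : ∀ y ∈ pre ++ [x], y ≤ m := by
        intro y hy
        rcases List.mem_append.1 hy with h | h
        · exact hub y h
        · simp only [List.mem_singleton] at h; omega
      have hidx' : PySem.List.index? (pre ++ [x]) m = some p := by
        rw [PySem.List.index?_append_of_mem [x] hmem]; exact hidx
      have := ih (pre ++ [x]) L m p h1 (by simp [hmem]) hub' hidx'
      rw [hcast] at this
      simpa using this

lemma searchA_char (x : Int) (t : List Int) :
    let r := search_min (x :: t)
    r.1 ∈ (x :: t) ∧ (∀ y ∈ (x :: t), y ≤ r.1) ∧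
      PySem.List.index? (x :: t) r.1 = some r.2.toNat ∧ 0 ≤ r.2 := by
  have h := searchA_loop_inv t [x] (x :: t) x 0 rfl (by simp) (by simp)
    (PySem.List.index?_cons_self x [])
  simp only [List.length_cons, List.length_nil] at h
  simpa [search_min, PySem.List.pyGet?_zero_cons] using h

-- ===== VERDICT (by name: the statement is the Claim_ definition above) =====
theorem search_min_spec : Claim_equal_search_min := by
  intro S _ hpre
  unfold Spec_search_min
  obtain ⟨x, t, rfl⟩ := List.exists_cons_of_ne_nil hpre
  obtain ⟨hmem, hub, hidx, hnn⟩ := searchA_char x t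
  unfold search_min_alt
  rcases hmax : PySem.List.max? (x :: t) (fun x => x) with _ | m
  · exact absurd ((PySem.List.max?_eq_none_iff _ _).1 hmax) (by simp)
  · have hm_mem := PySem.List.max?_mem hmax
    have hm_ub := PySem.List.max?_isMax hmax
    have heq : m = (search_min (x :: t)).1 :=
      le_antisymm (hub m hm_mem) (hm_ub _ hmem)
    show search_min (x :: t) = (m, (((PySem.List.index? (x :: t) m).getD 0 : Nat) : Int))
    rw [heq, hidx]
    exact Prod.ext rfl (by simp; omega)
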